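-- pv_equiv track=rewrite | github.com/smalbadger/Hangman | HangmanWordBank.py | wordIsValid
-- ===== SOURCE A (Python) =====
-- def wordIsValid(word):
--     a = ord('a')
--     z = ord('z')
--     A = ord('A')
--     Z = ord('Z')
--     space = ord(' ')
--     comma = ord(',')
--
--     if word.count(',') != 1:
--         return False
--
--     for character in word:
--         ascii = ord(character)
--         if ascii >= a and ascii <= z:
--             continue
--         elif ascii >= A and ascii <= Z:
--             continue
--         elif ascii == space:
--             continue
--         elif ascii == comma:
--             continue
--         else:
--             return False
--     return True
-- ===== SOURCE B (Python) =====
-- def _nextState(state, ch):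
--     if state == 2:
--         return 2
--     if ch == ',':
--         return 1 if state == 0 else 2
--     if 'a' <= ch <= 'z' or 'A' <= ch <= 'Z' or ch == ' ':
--         return state
--     return 2
--
--
-- def wordIsValid(word):
--     state = 0
--     for ch in word:
--         state = _nextState(state, ch)
--     return state == 1
-- ===== Notes on version B (the rewrite author's own statement) =====
-- stated objective: alternative
-- what changed: B replaces A's two staged passes (a comma-count gate, then a character loop with early return) by a single left fold of the whole string through a three-state DFA (no comma seen / one comma seen / dead), accepting iff the final state is 1.
import Mathlib
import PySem

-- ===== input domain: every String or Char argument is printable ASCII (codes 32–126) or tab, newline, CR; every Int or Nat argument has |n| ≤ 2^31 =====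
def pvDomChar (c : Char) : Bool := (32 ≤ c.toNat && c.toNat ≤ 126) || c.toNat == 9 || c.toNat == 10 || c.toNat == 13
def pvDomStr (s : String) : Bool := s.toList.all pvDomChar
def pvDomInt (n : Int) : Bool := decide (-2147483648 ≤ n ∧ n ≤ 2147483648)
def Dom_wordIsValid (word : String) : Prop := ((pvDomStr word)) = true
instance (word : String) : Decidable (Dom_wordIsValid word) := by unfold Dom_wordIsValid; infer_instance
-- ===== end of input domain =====

-- B replaces A's two staged passes (comma count, then a character loop with early
-- return) by a single left fold through a three-state DFA; same cost, different algorithm.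

-- ===== PORT A =====
-- A's character loop: continue on letter/space/comma, return False otherwise
def wordIsValidLoopA (chars : List Char) : Bool :=
  match chars with
  | [] => true
  | character :: rest =>
    let ascii := character.toNat
    if 97 ≤ ascii ∧ ascii ≤ 122 then wordIsValidLoopA rest
    else if 65 ≤ ascii ∧ ascii ≤ 90 then wordIsValidLoopA rest
    else if ascii = 32 then wordIsValidLoopA rest
    else if ascii = 44 then wordIsValidLoopA rest
    else false

def wordIsValid (word : String) : Bool :=
  if PySem.Str.count word "," ≠ 1 then false
  else wordIsValidLoopA word.toList

-- ===== PORT B =====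
-- B's DFA transition: 0 = no comma yet, 1 = one comma seen, 2 = dead
def wivNextState (state : Nat) (ch : Char) : Nat :=
  if state = 2 then 2
  else if ch = ',' then (if state = 0 then 1 else 2)
  else if (decide ('a' ≤ ch) && decide (ch ≤ 'z')) ||
          (decide ('A' ≤ ch) && decide (ch ≤ 'Z')) || (ch == ' ') then state
  else 2

def wordIsValid_alt (word : String) : Bool :=
  word.toList.foldl wivNextState 0 == 1

-- ===== PRECONDITION & SPEC =====
def Spec_wordIsValid (word : String) (out : Bool) : Prop := out = wordIsValid_alt word
instance (word : String) (out : Bool) : Decidable (Spec_wordIsValid word out) := by unfold Spec_wordIsValid; infer_instance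

-- ===== CLAIM (what is proved, stated in full; the proofs are below) =====
def Claim_equal_wordIsValid : Prop := ∀ (word : String), Dom_wordIsValid word → Spec_wordIsValid word (wordIsValid word)

-- ===== LEMMAS AND PROOFS =====

-- character predicate of B's DFA keep-state branch
def okNo (ch : Char) : Bool :=
  (decide ('a' ≤ ch) && decide (ch ≤ 'z')) ||
  (decide ('A' ≤ ch) && decide (ch ≤ 'Z')) || (ch == ' ')

-- character predicate of A's loop (comma allowed)
def okWith (ch : Char) : Bool := okNo ch || (ch == ',')

theorem char_le_toNat (a b : Char) : a ≤ b ↔ a.toNat ≤ b.toNat := by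
  rw [Char.le_def, UInt32.le_iff_toNat_le]; rfl

theorem char_toNat_inj (a b : Char) : a.toNat = b.toNat ↔ a = b :=
  eq_iff_eq_of_cmp_eq_cmp rfl

theorem okWith_iff (c : Char) : okWith c = true ↔
    ((97 ≤ c.toNat ∧ c.toNat ≤ 122) ∨ (65 ≤ c.toNat ∧ c.toNat ≤ 90) ∨
      c.toNat = 32 ∨ c.toNat = 44) := by
  unfold okWith okNo
  simp only [Bool.or_eq_true, Bool.and_eq_true, decide_eq_true_iff, beq_iff_eq,
    ← char_toNat_inj, char_le_toNat]
  simp only [show ('a').toNat = 97 from rfl, show ('z').toNat = 122 from rfl,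
    show ('A').toNat = 65 from rfl, show ('Z').toNat = 90 from rfl,
    show (' ').toNat = 32 from rfl, show (',').toNat = 44 from rfl]
  tauto

theorem loopA_eq_all (chars : List Char) : wordIsValidLoopA chars = chars.all okWith := by
  induction chars with
  | nil => rfl
  | cons c rest ih =>
    simp only [wordIsValidLoopA, List.all_cons, ih]
    split_ifs with h1 h2 h3 h4
    · rw [(okWith_iff c).mpr (Or.inl h1), Bool.true_and]
    · rw [(okWith_iff c).mpr (Or.inr (Or.inl h2)), Bool.true_and]
    · rw [(okWith_iff c).mpr (Or.inr (Or.inr (Or.inl h3))), Bool.true_and]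
    · rw [(okWith_iff c).mpr (Or.inr (Or.inr (Or.inr h4))), Bool.true_and]
    · have hf : okWith c = false := by
        rw [Bool.eq_false_iff]
        intro hh
        rcases (okWith_iff c).mp hh with h | h | h | h
        · exact h1 h
        · exact h2 h
        · exact h3 h
        · exact h4 h
      rw [hf, Bool.false_and]

-- Chars.count with the single-character needle [','] counts list occurrences
theorem countGo_comma (l : List Char) (fuel acc : Nat) (h : l.length ≤ fuel) :
    PySem.Chars.count.go [','] fuel l acc = acc + l.count ',' := by
  induction l generalizing fuel acc with
  | nil =>
    cases fuel <;> simp [PySem.Chars.count.go]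
  | cons c t ih =>
    cases fuel with
    | zero => simp at h
    | succ f =>
      have hf : t.length ≤ f := by simpa using h
      by_cases hc : c = ','
      · subst hc
        have hpre : List.isPrefixOf [','] (',' :: t) = true := by
          simp [List.isPrefixOf]
        simp only [PySem.Chars.count.go, hpre, if_pos]
        show PySem.Chars.count.go [','] f t (acc + 1) = acc + List.count ',' (',' :: t)
        rw [ih f (acc + 1) hf]
        simp [List.count_cons]
        omega
      · have hpre : List.isPrefixOf [','] (c :: t) = false := by
          simp [List.isPrefixOf]; exact fun h => absurd h.symm hc
        simp only [PySem.Chars.count.go, hpre]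
        rw [if_neg (by simp), ih f acc hf]
        simp [hc]

theorem count_comma (l : List Char) : PySem.Chars.count l [','] = l.count ',' := by
  unfold PySem.Chars.count
  rw [if_neg (by simp), countGo_comma l l.length 0 (le_refl _)]
  omega

-- the dead state 2 is absorbing
theorem fold_dead (l : List Char) : l.foldl wivNextState 2 = 2 := by
  induction l with
  | nil => rfl
  | cons d u ihd => simp only [List.foldl_cons]; simp [wivNextState]; exact ihd

-- the DFA fold from a live state: dead iff a bad char occurs, else clipped comma count
theorem fold_main (l : List Char) (s : Nat) (hs : s ≤ 1) :
    l.foldl wivNextState s = if l.all okWith then min (s + l.count ',') 2 else 2 := by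
  induction l generalizing s with
  | nil => simp; omega
  | cons c t ih =>
    by_cases hc : c = ','
    · subst hc
      have hok : okWith ',' = true := by decide
      by_cases h0 : s = 0
      · subst h0
        have hstep : wivNextState 0 ',' = 1 := by decide
        simp only [List.foldl_cons, hstep, ih 1 (by omega), List.all_cons, hok,
          Bool.true_and, List.count_cons]
        by_cases h : t.all okWith = true <;> simp [h] <;> omega
      · have h1 : s = 1 := by omega
        subst h1
        have hstep : wivNextState 1 ',' = 2 := by decide
        simp only [List.foldl_cons, hstep, fold_dead, List.all_cons, hok, Bool.true_and,
          List.count_cons]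
        by_cases h : t.all okWith = true <;> simp [h] <;> omega
    · by_cases hn : okNo c = true
      · have hstep : wivNextState s c = s := by
          unfold wivNextState
          rw [if_neg (by omega), if_neg hc, if_pos (by unfold okNo at hn; exact hn)]
        have hok : okWith c = true := by simp [okWith, hn]
        simp only [List.foldl_cons, hstep, ih s hs, List.all_cons, hok, Bool.true_and,
          List.count_cons]
        simp [hc]
      · have hstep : wivNextState s c = 2 := by
          unfold wivNextState
          rw [if_neg (by omega), if_neg hc,
            if_neg (by unfold okNo at hn; simpa using hn)]
        have hok : okWith c = false := by
          simp [okWith, hc]; simpa using hn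
        simp [List.foldl_cons, hstep, fold_dead, hok]

-- ===== VERDICT (by name: the statement is the Claim_ definition above) =====
theorem wordIsValid_spec : Claim_equal_wordIsValid := by
  intro word _
  unfold Spec_wordIsValid wordIsValid wordIsValid_alt
  rw [PySem.Str.count_eq]
  show (if PySem.Chars.count word.toList [','] ≠ 1 then false else wordIsValidLoopA word.toList)
      = (word.toList.foldl wivNextState 0 == 1)
  rw [count_comma, loopA_eq_all, fold_main word.toList 0 (by omega)]
  by_cases hg : word.toList.all okWith = true
  · rw [hg, if_pos rfl]
    by_cases h1 : word.toList.count ',' = 1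
    · rw [if_neg (by omega), h1]
      decide
    · rw [if_pos (by omega)]
      symm
      rw [beq_eq_false_iff_ne]
      omega
  · rw [Bool.not_eq_true] at hg
    rw [hg, if_neg (show ¬(false = true) by simp)]
    by_cases h1 : word.toList.count ',' = 1
    · rw [if_neg (by omega)]
      decide
    · rw [if_pos (by omega)]
      decide
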